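-- pv_equiv track=rewrite | github.com/eduardogiraudi/App | OTP-Server/app.py | hash_to_last_4_int
-- ===== SOURCE A (Python) =====
-- def hash_to_last_4_int(hash):
--     otp = ''
--     for i in range(len(hash)-1,-1,-1,):
--         if hash[i].isdigit():
--             otp+=hash[i]
--         if len(otp) == 4:
--             break
--     return otp
-- ===== SOURCE B (Python) =====
-- def hash_to_last_4_int(hash):
--     digits = [c for c in hash if c.isdigit()]
--     return ''.join(reversed(digits[-4:]))
-- ===== Notes on version B (the rewrite author's own statement) =====
-- stated objective: simpler
-- what changed: Replaces A's backward index loop with early break and per-step string concatenation by a forward digit-filter comprehension followed by a tail slice and reversal.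
import Mathlib
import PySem

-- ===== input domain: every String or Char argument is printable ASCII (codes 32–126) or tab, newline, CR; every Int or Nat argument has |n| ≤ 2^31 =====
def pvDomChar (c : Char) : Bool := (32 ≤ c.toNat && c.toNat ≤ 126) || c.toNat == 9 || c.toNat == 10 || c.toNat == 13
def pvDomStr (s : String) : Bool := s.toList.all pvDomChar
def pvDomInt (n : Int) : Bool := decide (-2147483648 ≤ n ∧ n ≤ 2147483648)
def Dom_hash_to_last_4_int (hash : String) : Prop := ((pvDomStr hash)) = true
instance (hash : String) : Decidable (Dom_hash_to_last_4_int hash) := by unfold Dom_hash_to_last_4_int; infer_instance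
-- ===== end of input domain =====

-- B replaces A's backward index loop with early break by a forward digit-filter pass
-- followed by a tail slice and a reversal (objective: simpler).

-- ===== PORT A =====
-- A's loop: for i in range(len(hash)-1,-1,-1): if hash[i].isdigit(): otp += hash[i]; if len(otp)==4: break
def hashA_loop (cs : List Char) : List Int → List Char → List Char
  | [], otp => otp
  | i :: rest, otp =>
    match PySem.List.pyGet? cs i with
    | none => otp  -- unreachable: every index produced by range(len-1,-1,-1) is in range
    | some c =>
      let otp' := if PySem.Chars.isdigit c then otp ++ [c] else otp
      if otp'.length = 4 then otp' else hashA_loop cs rest otp'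

def hash_to_last_4_int (hash : String) : String :=
  let cs := hash.toList
  String.ofList (hashA_loop cs (PySem.List.pyRange ((cs.length : Int) - 1) (-1) (-1)) [])

-- ===== PORT B =====
def hash_to_last_4_int_alt (hash : String) : String :=
  let digits := hash.toList.filter PySem.Chars.isdigit
  String.ofList (PySem.List.slice digits (some (-4)) none).reverse

-- ===== PRECONDITION & SPEC =====
def Spec_hash_to_last_4_int (hash : String) (out : String) : Prop := out = hash_to_last_4_int_alt hash
instance (hash : String) (out : String) : Decidable (Spec_hash_to_last_4_int hash out) := by unfold Spec_hash_to_last_4_int; infer_instance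

-- ===== CLAIM (what is proved, stated in full; the proofs are below) =====
def Claim_equal_hash_to_last_4_int : Prop := ∀ (hash : String), Dom_hash_to_last_4_int hash → Spec_hash_to_last_4_int hash (hash_to_last_4_int hash)

-- ===== LEMMAS AND PROOFS =====

-- proof-side helper: A's loop body re-expressed directly on the (reversed) character list
def charLoop : List Char → List Char → List Char
  | [], otp => otp
  | c :: rest, otp =>
    let otp' := if PySem.Chars.isdigit c then otp ++ [c] else otp
    if otp'.length = 4 then otp' else charLoop rest otp'

-- the index list range(len-1,-1,-1) is the reversed List.range, cast to Int
lemma pyRange_down (n : Nat) :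
    PySem.List.pyRange ((n : Int) - 1) (-1) (-1) = List.map (fun (j : Nat) => (j : Int)) (List.range n).reverse := by
  simp only [PySem.List.pyRange]
  rcases Nat.eq_zero_or_pos n with h | h
  · subst h; decide
  · have hlt : (-1 : Int) < (n : Int) - 1 := by omega
    simp only [if_neg (by omega : ¬ ((-1:Int) = 0)), if_neg (by omega : ¬ ((0:Int) < -1)), if_pos hlt]
    have hc1 : (((n : Int) - 1) - (-1) + -(-1) - 1) / -(-1) = (n : Int) := by norm_num
    rw [hc1, Int.toNat_natCast]
    apply List.ext_getElem
    · simp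
    · intro i h1 h2
      have hi : i < n := by simpa using h1
      simp only [List.getElem_map, List.getElem_reverse, List.getElem_range, List.length_range]
      omega

-- running A's index loop over [k-1,…,0] is running charLoop over the reversed k-prefix
lemma hashA_loop_eq_charLoop (cs : List Char) :
    ∀ (k : Nat), k ≤ cs.length → ∀ otp,
      hashA_loop cs (List.map (fun (j : Nat) => (j : Int)) (List.range k).reverse) otp
        = charLoop ((cs.take k).reverse) otp := by
  intro k
  induction k with
  | zero => intro _ otp; simp [hashA_loop, charLoop]
  | succ k ih =>
    intro hk otp
    have hklt : k < cs.length := by omega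
    have hidx : List.map (fun (j : Nat) => (j : Int)) (List.range (k+1)).reverse
        = (k : Int) :: List.map (fun (j : Nat) => (j : Int)) (List.range k).reverse := by
      rw [List.range_succ, List.reverse_append]; simp
    have htake : (cs.take (k+1)).reverse = cs[k] :: (cs.take k).reverse := by
      rw [List.take_add_one, List.reverse_append]
      simp [List.getElem?_eq_getElem hklt]
    rw [hidx, htake]
    show (match PySem.List.pyGet? cs (k : Int) with
      | none => otp
      | some c =>
        let otp' := if PySem.Chars.isdigit c then otp ++ [c] else otp
        if otp'.length = 4 then otp' else hashA_loop cs (List.map (fun (j : Nat) => (j : Int)) (List.range k).reverse) otp') = _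
    rw [PySem.List.pyGet?_natCast, List.getElem?_eq_getElem hklt]
    simp only [charLoop]
    split_ifs <;> first | rfl | exact ih (by omega) _

-- charLoop appends the first (4 - |otp|) digits of its input
lemma charLoop_spec :
    ∀ (l : List Char) (otp : List Char), otp.length < 4 →
      charLoop l otp = otp ++ (l.filter PySem.Chars.isdigit).take (4 - otp.length) := by
  intro l
  induction l with
  | nil => intro otp h; simp [charLoop]
  | cons c rest ih =>
    intro otp h
    simp only [charLoop, List.filter_cons]
    by_cases hc : PySem.Chars.isdigit c
    · simp only [hc, if_pos]
      by_cases h4 : (otp ++ [c]).length = 4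
      · simp only [if_pos h4]
        have : 4 - otp.length = 1 := by simp at h4; omega
        simp [this]
      · simp only [if_neg h4]
        rw [ih (otp ++ [c]) (by simp at h4 ⊢; omega)]
        have : 4 - otp.length = (4 - (otp ++ [c]).length) + 1 := by simp at h4 ⊢; omega
        simp [this, List.take_succ_cons]
    · simp only [hc, if_neg, Bool.false_eq_true, not_false_iff]
      have hlen : otp.length ≠ 4 := by omega
      rw [if_neg hlen]
      exact ih otp h

-- ===== VERDICT (by name: the statement is the Claim_ definition above) =====
theorem hash_to_last_4_int_spec : Claim_equal_hash_to_last_4_int := by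
  unfold Claim_equal_hash_to_last_4_int
  intro hash _
  unfold Spec_hash_to_last_4_int hash_to_last_4_int hash_to_last_4_int_alt
  show String.ofList (hashA_loop hash.toList
      (PySem.List.pyRange ((hash.toList.length : Int) - 1) (-1) (-1)) [])
    = String.ofList (PySem.List.slice (hash.toList.filter PySem.Chars.isdigit) (some (-4)) none).reverse
  generalize hash.toList = cs
  rw [pyRange_down, hashA_loop_eq_charLoop cs cs.length le_rfl, List.take_length,
      charLoop_spec cs.reverse [] (by simp),
      PySem.List.slice_from_neg_ofNat (cs.filter PySem.Chars.isdigit) 4 (by omega),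
      List.reverse_drop]
  simp only [List.nil_append, List.filter_reverse, List.length_nil, Nat.sub_zero]
  by_cases hlen : 4 ≤ (cs.filter PySem.Chars.isdigit).length
  · have h4 : (List.filter PySem.Chars.isdigit cs).length
        - ((List.filter PySem.Chars.isdigit cs).length - 4) = 4 := by omega
    rw [h4]
  · rw [List.take_of_length_le (by simp; omega), List.take_of_length_le (by simp; omega)]
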